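-- pv_equiv track=rewrite | github.com/olgabot/kvector | kvector/kmer.py | make_kmers
-- ===== SOURCE A (Python) =====
-- import itertools
--
-- DNA = 'ACGT'
--
-- def make_kmers(kmer_lengths, residues=DNA):
--     """Create all possible substrings of provided lengths
--
--     Parameters
--     ----------
--     kmer_lengths : list of ints
--         Lengths of substrings to create
--     residues : str
--         The strings to sample from
--
--     Returns
--     -------
--     kmers : list of str
--         All possible kmers of the lengths provided, given the residues
--     """
--     try:
--         return list(itertools.chain(
--             *[map(
--                 lambda x: ''.join(x), itertools.product(
--                     residues, repeat=k)) for k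
--               in kmer_lengths]))
--     except TypeError:
--         # Kmer length is only one number
--         return list(map(lambda x: ''.join(x), itertools.product(
--             residues, repeat=kmer_lengths)))
-- ===== SOURCE B (Python) =====
-- DNA = 'ACGT'
--
-- def _kmers(k, residues):
--     """All length-k strings over residues, in product order (first char slowest):
--     grow bottom-up by prepending each residue to every shorter kmer."""
--     acc = ['']
--     for _ in range(k):
--         acc = [r + s for r in residues for s in acc]
--         if not acc:
--             return []
--     return acc
--
-- def make_kmers(kmer_lengths, residues=DNA):
--     try:
--         lengths = list(kmer_lengths)
--     except TypeError:
--         # Kmer length is only one number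
--         lengths = [kmer_lengths]
--     out = []
--     for k in lengths:
--         out += _kmers(k, residues)
--     return out
-- ===== Notes on version B (the rewrite author's own statement) =====
-- stated objective: alternative
-- what changed: Replaces itertools.product over char tuples plus ''.join and chain by a direct recursion on k that prepends each residue to every (k-1)-mer string, concatenated with a plain accumulator loop.
import Mathlib
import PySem

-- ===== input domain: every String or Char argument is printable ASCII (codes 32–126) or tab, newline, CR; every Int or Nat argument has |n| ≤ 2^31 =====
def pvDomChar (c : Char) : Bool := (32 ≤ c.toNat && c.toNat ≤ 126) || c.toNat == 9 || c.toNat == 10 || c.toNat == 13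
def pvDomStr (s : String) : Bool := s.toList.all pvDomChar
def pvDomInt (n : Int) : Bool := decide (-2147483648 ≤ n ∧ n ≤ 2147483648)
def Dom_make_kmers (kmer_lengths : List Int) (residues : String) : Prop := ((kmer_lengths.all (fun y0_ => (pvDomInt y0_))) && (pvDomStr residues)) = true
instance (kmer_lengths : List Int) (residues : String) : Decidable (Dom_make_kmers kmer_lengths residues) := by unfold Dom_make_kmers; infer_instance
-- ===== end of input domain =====

-- B replaces itertools.product + ''.join + chain with an iterative bottom-up build that
-- prepends each residue to every shorter kmer (alternative decomposition, same cost).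


-- ===== PORT A =====
-- itertools.product(residues, repeat=k): iterative pool product, last position fastest
def pyProduct (pool : List Char) (k : Nat) : List (List Char) :=
  (List.range k).foldl (fun acc _ => acc.flatMap (fun xs => pool.map (fun y => xs ++ [y]))) [[]]

-- list(itertools.chain(*[map(''.join, product(residues, repeat=k)) for k in kmer_lengths]))
-- (the try's TypeError branch is unreachable here: kmer_lengths is a list of ints;
--  k.toNat is exact because Pre_ states 0 ≤ k)
def make_kmers (kmer_lengths : List Int) (residues : String) : List String :=
  kmer_lengths.flatMap (fun k => (pyProduct residues.toList k.toNat).map (fun t => String.mk t))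

-- ===== PORT B =====
-- acc = [r + s for r in residues for s in acc]  (over List Char; String.mk at the end = Python's r + s string build, exact on this domain)
def kmersStep (pool : List Char) (acc : List (List Char)) : List (List Char) :=
  pool.flatMap (fun r => acc.map (fun s => r :: s))

-- the 'for _ in range(k): … ; if not acc: return []' loop of _kmers, counting down
def kmersLoop (pool : List Char) (acc : List (List Char)) : Nat → List (List Char)
  | 0 => acc
  | n + 1 =>
    let acc' := kmersStep pool acc
    if acc' = [] then [] else kmersLoop pool acc' n

-- accumulator loop 'out += _kmers(k, residues)' over kmer_lengths
def make_kmers_alt (kmer_lengths : List Int) (residues : String) : List String :=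
  kmer_lengths.foldl
    (fun out k => out ++ (kmersLoop residues.toList [[]] k.toNat).map (fun t => String.mk t)) []

-- ===== PRECONDITION & SPEC =====
-- Pre_ excludes negative lengths, on which Python A raises ValueError (negative repeat)
def Pre_make_kmers (kmer_lengths : List Int) (residues : String) : Prop :=
  ∀ k ∈ kmer_lengths, 0 ≤ k

instance (kmer_lengths : List Int) (residues : String) : Decidable (Pre_make_kmers kmer_lengths residues) := by unfold Pre_make_kmers; infer_instance

def pvWitness_make_kmers : List Int × String := ([1, 2], "ACGT")

def Spec_make_kmers (kmer_lengths : List Int) (residues : String) (out : List String) : Prop := out = make_kmers_alt kmer_lengths residues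
instance (kmer_lengths : List Int) (residues : String) (out : List String) : Decidable (Spec_make_kmers kmer_lengths residues out) := by unfold Spec_make_kmers; infer_instance

-- ===== CLAIM (what is proved, stated in full; the proofs are below) =====
def Claim_equal_make_kmers : Prop := ∀ (kmer_lengths : List Int) (residues : String), Dom_make_kmers kmer_lengths residues → Pre_make_kmers kmer_lengths residues → Spec_make_kmers kmer_lengths residues (make_kmers kmer_lengths residues)

-- ===== LEMMAS AND PROOFS =====

theorem kmersStep_nil (pool : List Char) : kmersStep pool [] = [] := by
  simp [kmersStep]

-- the early 'return []' is invisible in the result: [] is a fixed point of the step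
theorem kmersLoop_eq_iterate (pool : List Char) (n : Nat) (acc : List (List Char)) :
    kmersLoop pool acc n = (kmersStep pool)^[n] acc := by
  induction n generalizing acc with
  | zero => rfl
  | succ n ih =>
    show (if kmersStep pool acc = [] then [] else kmersLoop pool (kmersStep pool acc) n)
        = (kmersStep pool)^[n] (kmersStep pool acc)
    by_cases h : kmersStep pool acc = []
    · rw [if_pos h, h, Function.iterate_fixed (kmersStep_nil pool)]
    · rw [if_neg h, ih]

theorem pyProduct_succ (pool : List Char) (k : Nat) :
    pyProduct pool (k + 1)
      = (pyProduct pool k).flatMap (fun xs => pool.map (fun y => xs ++ [y])) := by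
  simp [pyProduct, List.range_succ]

theorem iterate_step_snoc (pool : List Char) (k : Nat) :
    (kmersStep pool)^[k + 1] [[]]
      = ((kmersStep pool)^[k] [[]]).flatMap (fun xs => pool.map (fun y => xs ++ [y])) := by
  induction k with
  | zero =>
    have h : ∀ (l : List Char), l.flatMap (fun r => [[r]]) = l.map (fun y => [y]) := by
      intro l
      induction l with
      | nil => rfl
      | cons a t ih => simp [List.flatMap_cons, ih]
    simp [kmersStep, h]
  | succ k ih =>
    calc (kmersStep pool)^[k + 2] [[]]
        = kmersStep pool ((kmersStep pool)^[k + 1] [[]]) := by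
          rw [Function.iterate_succ_apply']
      _ = kmersStep pool (((kmersStep pool)^[k] [[]]).flatMap
            (fun xs => pool.map (fun y => xs ++ [y]))) := by rw [ih]
      _ = ((kmersStep pool)^[k + 1] [[]]).flatMap (fun xs => pool.map (fun y => xs ++ [y])) := by
          rw [Function.iterate_succ_apply']
          simp [kmersStep, List.map_flatMap, List.flatMap_map, List.map_map,
            Function.comp_def, List.flatMap_assoc]

theorem iterate_step_eq_pyProduct (pool : List Char) (k : Nat) :
    (kmersStep pool)^[k] [[]] = pyProduct pool k := by
  induction k with
  | zero => rfl
  | succ k ih => rw [iterate_step_snoc, ih, pyProduct_succ]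

theorem foldl_append_eq_flatMap' (f : Int → List String) (l : List Int) (init : List String) :
    l.foldl (fun out k => out ++ f k) init = init ++ l.flatMap f := by
  induction l generalizing init with
  | nil => simp
  | cons k l ih => simp [List.foldl_cons, ih]

-- ===== VERDICT (by name: the statement is the Claim_ definition above) =====
theorem make_kmers_spec : Claim_equal_make_kmers := by
  intro kmer_lengths residues _ _
  unfold Spec_make_kmers make_kmers make_kmers_alt
  rw [foldl_append_eq_flatMap']
  simp [kmersLoop_eq_iterate, iterate_step_eq_pyProduct]
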